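-- pv_equiv track=rewrite | github.com/yuchenxi2000/atom-dft2 | configuration.py | get_nr_max_for_l
-- ===== SOURCE A (Python) =====
-- def get_nr_max_for_l(config_map: dict[(int, int), int]) -> dict[int, int]:
--     nr_max_l_map = {}
--     for (n, l) in config_map:
--         nr = n - l - 1
--         if l in nr_max_l_map:
--             if nr_max_l_map[l] < nr:
--                 nr_max_l_map[l] = nr
--         else:
--             nr_max_l_map[l] = nr
--     return nr_max_l_map
-- ===== SOURCE B (Python) =====
-- def get_nr_max_for_l(config_map: dict[(int, int), int]) -> dict[int, int]:
--     groups = {}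
--     for (n, l) in config_map:
--         groups.setdefault(l, []).append(n - l - 1)
--     return {l: max(nrs) for l, nrs in groups.items()}
-- ===== Notes on version B (the rewrite author's own statement) =====
-- stated objective: simpler
-- what changed: Replaces A's incremental running-max dict (conditional compare-and-update per item) with a group-then-reduce: one pass collects all nr = n-l-1 values per l via setdefault, then a comprehension takes max over each group.
import Mathlib
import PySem

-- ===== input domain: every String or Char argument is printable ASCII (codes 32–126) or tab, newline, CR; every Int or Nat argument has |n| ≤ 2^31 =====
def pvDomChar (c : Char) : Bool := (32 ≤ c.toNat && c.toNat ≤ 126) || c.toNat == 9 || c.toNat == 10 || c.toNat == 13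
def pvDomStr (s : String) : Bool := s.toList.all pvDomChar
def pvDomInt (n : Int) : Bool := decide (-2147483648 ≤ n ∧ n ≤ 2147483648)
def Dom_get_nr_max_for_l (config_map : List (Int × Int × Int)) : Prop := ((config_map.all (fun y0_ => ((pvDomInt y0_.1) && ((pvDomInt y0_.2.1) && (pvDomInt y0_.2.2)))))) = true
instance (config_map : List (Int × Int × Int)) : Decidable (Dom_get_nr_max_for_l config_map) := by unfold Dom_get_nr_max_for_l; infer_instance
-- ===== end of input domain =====

-- B replaces A's incremental running-max dict with a group-then-reduce (collect all nr per l, then max each group); objective: simpler.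


-- ===== PORT A =====
def get_nr_max_for_l (config_map : List (Int × Int × Int)) : List (Int × Int) :=
  (config_map.foldl (fun d p =>
      let nr := p.1 - p.2.1 - 1
      match d.get? p.2.1 with
      | some v => if v < nr then d.insert p.2.1 nr else d
      | none => d.insert p.2.1 nr) PySem.Dict.empty).items

-- ===== PORT B =====
-- max(nrs): every group list is nonempty by construction, so the `none` branch (Python: ValueError) is unreachable
def pyMaxList (xs : List Int) : Int :=
  match PySem.List.max? xs (fun x => x) with
  | some m => m
  | none => 0

def get_nr_max_for_l_alt (config_map : List (Int × Int × Int)) : List (Int × Int) :=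
  let groups := config_map.foldl
    (fun d p => d.modify p.2.1 [] (fun xs => xs ++ [p.1 - p.2.1 - 1])) PySem.Dict.empty
  groups.items.map (fun q => (q.1, pyMaxList q.2))

-- ===== PRECONDITION & SPEC =====
def Spec_get_nr_max_for_l (config_map : List (Int × Int × Int)) (out : List (Int × Int)) : Prop := out = get_nr_max_for_l_alt config_map
instance (config_map : List (Int × Int × Int)) (out : List (Int × Int)) : Decidable (Spec_get_nr_max_for_l config_map out) := by unfold Spec_get_nr_max_for_l; infer_instance

-- ===== CLAIM (what is proved, stated in full; the proofs are below) =====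
def Claim_equal_get_nr_max_for_l : Prop := ∀ (config_map : List (Int × Int × Int)), Dom_get_nr_max_for_l config_map → Spec_get_nr_max_for_l config_map (get_nr_max_for_l config_map)

-- ===== LEMMAS AND PROOFS =====

def astep (d : PySem.Dict Int Int) (p : Int × Int × Int) : PySem.Dict Int Int :=
  let nr := p.1 - p.2.1 - 1
  match d.get? p.2.1 with
  | some v => if v < nr then d.insert p.2.1 nr else d
  | none => d.insert p.2.1 nr

theorem get_nr_max_for_l_eq (xs : List (Int × Int × Int)) :
    get_nr_max_for_l xs = (xs.foldl astep PySem.Dict.empty).items := rfl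

theorem keys_astep (d : PySem.Dict Int Int) (p : Int × Int × Int) :
    (astep d p).keys = PySem.Set.add d.keys p.2.1 := by
  unfold astep PySem.Set.add
  rcases h : d.get? p.2.1 with _ | v <;> simp only []
  · have hc : d.contains p.2.1 = false := by
      rw [PySem.Dict.contains_eq_isSome_get?, h]; rfl
    have hs : PySem.Set.contains d.keys p.2.1 = false := by
      simp only [PySem.Set.contains, List.contains_eq_mem, decide_eq_false_iff_not]
      intro hm
      exact absurd ((PySem.Dict.contains_iff_mem_keys _ _).mpr hm) (by simp [hc])
    simp only [hs, Bool.false_eq_true, if_false]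
    exact PySem.Dict.keys_insert_of_not_contains _ _ hc
  · have hc : d.contains p.2.1 = true := by
      rw [PySem.Dict.contains_eq_isSome_get?, h]; rfl
    have hs : PySem.Set.contains d.keys p.2.1 = true := by
      simp only [PySem.Set.contains, List.contains_eq_mem, decide_eq_true_eq]
      exact (PySem.Dict.contains_iff_mem_keys _ _).mp hc
    simp only [hs, if_true]
    split_ifs
    · exact PySem.Dict.keys_insert_of_contains _ _ hc
    · rfl

theorem keys_foldl_astep (xs : List (Int × Int × Int)) (d : PySem.Dict Int Int) :
    (xs.foldl astep d).keys = PySem.Set.update d.keys (xs.map (·.2.1)) := by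
  induction xs generalizing d with
  | nil => simp [PySem.Set.update]
  | cons p t ih =>
    simp only [List.foldl_cons, List.map_cons]
    rw [ih, keys_astep]
    rfl

theorem nodup_keys_astep (d : PySem.Dict Int Int) (p : Int × Int × Int)
    (h : d.keys.Nodup) : (astep d p).keys.Nodup := by
  unfold astep
  rcases d.get? p.2.1 with _ | v <;> simp only []
  · exact PySem.Dict.nodup_keys_insert _ _ _ h
  · split_ifs
    · exact PySem.Dict.nodup_keys_insert _ _ _ h
    · exact h

theorem nodup_keys_foldl_astep (xs : List (Int × Int × Int)) (d : PySem.Dict Int Int)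
    (h : d.keys.Nodup) : (xs.foldl astep d).keys.Nodup := by
  induction xs generalizing d with
  | nil => exact h
  | cons p t ih => exact ih _ (nodup_keys_astep d p h)

/-- running max of a list of candidates on top of an optional current maximum -/
def omax : Option Int → List Int → Option Int
  | o, [] => o
  | none, y :: t => omax (some y) t
  | some m, y :: t => omax (some (max m y)) t

theorem omax_some (m : Int) (t : List Int) : omax (some m) t = some (t.foldl max m) := by
  induction t generalizing m with
  | nil => rfl
  | cons y t ih => simp [omax, ih]

theorem get?_foldl_astep (xs : List (Int × Int × Int)) (d : PySem.Dict Int Int) (c : Int) :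
    (xs.foldl astep d).get? c
      = omax (d.get? c) ((xs.filter (fun p => p.2.1 == c)).map (fun p => p.1 - p.2.1 - 1)) := by
  induction xs generalizing d with
  | nil => rfl
  | cons p t ih =>
    simp only [List.foldl_cons, List.filter_cons]
    by_cases hk : p.2.1 = c
    · subst hk
      simp only [BEq.rfl, if_true, List.map_cons]
      rw [ih]
      unfold astep
      rcases h : d.get? p.2.1 with _ | v <;> simp only []
      · rw [PySem.Dict.get?_insert_self]
        simp [omax]
      · split_ifs with hlt
        · rw [PySem.Dict.get?_insert_self]
          simp [omax, max_eq_right (le_of_lt hlt)]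
        · rw [h]
          simp [omax, max_eq_left (not_lt.mp hlt)]
    · have hbe : (p.2.1 == c) = false := by simp [hk]
      simp only [hbe, Bool.false_eq_true, if_false]
      rw [ih]
      congr 1
      unfold astep
      rcases d.get? p.2.1 with _ | v <;> simp only []
      · exact PySem.Dict.get?_insert_of_ne _ _ (Ne.symm hk)
      · split_ifs
        · exact PySem.Dict.get?_insert_of_ne _ _ (Ne.symm hk)
        · rfl

theorem getD_grp (xs : List (Int × Int × Int)) (d : PySem.Dict Int (List Int)) (c : Int) :
    (xs.foldl (fun d p => d.modify p.2.1 [] (fun l => l ++ [p.1 - p.2.1 - 1])) d).getD c []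
      = d.getD c [] ++ (xs.filter (fun p => p.2.1 == c)).map (fun p => p.1 - p.2.1 - 1) := by
  induction xs generalizing d with
  | nil => simp
  | cons p t ih =>
    simp only [List.foldl_cons, List.filter_cons]
    rw [ih]
    by_cases hk : p.2.1 = c
    · simp [hk, PySem.Dict.getD_modify_self]
    · have hbe : (p.2.1 == c) = false := by simp [hk]
      have hck : ¬ c = p.2.1 := fun h => hk h.symm
      simp [hbe, PySem.Dict.getD_modify, hck]

theorem pyMaxList_cons (y : Int) (t : List Int) : pyMaxList (y :: t) = t.foldl max y := by
  simp [pyMaxList, PySem.List.max?_id_cons]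

-- ===== VERDICT (by name: the statement is the Claim_ definition above) =====
theorem get_nr_max_for_l_spec : Claim_equal_get_nr_max_for_l := by
  intro xs _
  unfold Spec_get_nr_max_for_l
  have halt : get_nr_max_for_l_alt xs
      = (xs.foldl (fun (d : PySem.Dict Int (List Int)) (p : Int × Int × Int) => d.modify p.2.1 [] (fun l => l ++ [p.1 - p.2.1 - 1])) PySem.Dict.empty).items.map (fun q => (q.1, pyMaxList q.2)) := rfl
  rw [get_nr_max_for_l_eq, halt]
  set A := xs.foldl astep PySem.Dict.empty with hA
  set G := xs.foldl (fun (d : PySem.Dict Int (List Int)) (p : Int × Int × Int) => d.modify p.2.1 [] (fun l => l ++ [p.1 - p.2.1 - 1])) PySem.Dict.empty with hG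
  have hAnd : A.keys.Nodup := nodup_keys_foldl_astep xs _ (by simp)
  have hGnd : G.keys.Nodup :=
    PySem.Dict.nodup_keys_foldl_modify_key xs (·.2.1) [] (fun _ p l => l ++ [p.1 - p.2.1 - 1]) _ (by simp)
  have hGkeys : G.keys = PySem.Set.update PySem.Dict.empty.keys (xs.map (·.2.1)) :=
    PySem.Dict.keys_foldl_modify_key xs (·.2.1) [] (fun _ p l => l ++ [p.1 - p.2.1 - 1]) _
  have hkeys : A.keys = G.keys := by
    rw [hA, keys_foldl_astep, hGkeys];rfl
  rw [PySem.Dict.items_eq_map_keys A hAnd 0, PySem.Dict.items_eq_map_keys G hGnd [],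
      List.map_map, hkeys]
  apply List.map_congr_left
  intro k hk
  have hgetG : G.getD k [] = (xs.filter (fun p => p.2.1 == k)).map (fun p => p.1 - p.2.1 - 1) := by
    rw [hG]
    simpa using getD_grp xs PySem.Dict.empty k
  have hkmem : k ∈ xs.map (·.2.1) := by
    have hk2 := hk
    rw [hGkeys] at hk2
    simp only [PySem.Dict.keys_empty] at hk2
    have hk3 : k ∈ PySem.Set.ofList (xs.map (·.2.1)) := by
      rwa [PySem.Set.ofList_eq_foldl]
    exact (PySem.Set.mem_ofList _ _).mp hk3
  obtain ⟨p, hp, hpk⟩ := List.mem_map.mp hkmem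
  have hne : (xs.filter (fun p => p.2.1 == k)).map (fun p => p.1 - p.2.1 - 1) ≠ [] := by
    have hpf : p ∈ xs.filter (fun p => p.2.1 == k) := by
      simp [List.mem_filter, hp, hpk]
    intro hcon
    simp only [List.map_eq_nil_iff] at hcon
    rw [hcon] at hpf
    exact absurd hpf (List.not_mem_nil)
  rcases hg : (xs.filter (fun p => p.2.1 == k)).map (fun p => p.1 - p.2.1 - 1) with _ | ⟨y, t⟩
  · exact absurd hg hne
  · have hgetA : A.get? k = some (t.foldl max y) := by
      rw [hA, get?_foldl_astep, PySem.Dict.get?_empty, hg]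
      simp [omax, omax_some]
    simp only [Function.comp]
    rw [PySem.Dict.getD_of_get?_eq_some _ _ hgetA, hgetG, hg, pyMaxList_cons]
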